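-- pv_equiv track=rewrite | github.com/AruJoy/algorithm-study | 백준/Gold/20327. 배열 돌리기 6/배열 돌리기 6.py | act_1
-- ===== SOURCE A (Python) =====
-- def act_1(scale, matrix, s_scale):
--     new_matrix = [row[:] for row in matrix]
--     for i in range(scale//s_scale):
--         for j in range(scale//s_scale):
--             start_y, end_y = i*s_scale, (i+1)*s_scale
--             start_x, end_x = j*s_scale, (j+1)*s_scale
--             for dy in range(s_scale):
--                 for dx in range(s_scale):
--                     new_matrix[start_y+dy][start_x+dx] = matrix[end_y-dy-1][start_x+dx]
--     return new_matrix
-- ===== SOURCE B (Python) =====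
-- def act_1(scale, matrix, s_scale):
--     # Functional reconstruction: build the result row by row with the closed-form
--     # mirror index y + s_scale - 1 - 2*(y % s_scale) inside the covered band region.
--     if s_scale <= 0:
--         return [row[:] for row in matrix]
--     w = scale // s_scale * s_scale
--     return [
--         matrix[y + s_scale - 1 - 2 * (y % s_scale)][:w] + row[w:]
--         if y < w else row[:]
--         for y, row in enumerate(matrix)
--     ]
-- ===== Notes on version B (the rewrite author's own statement) =====
-- stated objective: alternative
-- what changed: B replaces A's copy-then-mutate four-nested-loop cell writes with a pure single-pass reconstruction: each output row is built directly from the closed-form mirror row y + s_scale - 1 - 2*(y % s_scale) of its band (columns are unchanged by the transform), with no block loops and no mutation.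
import Mathlib
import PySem

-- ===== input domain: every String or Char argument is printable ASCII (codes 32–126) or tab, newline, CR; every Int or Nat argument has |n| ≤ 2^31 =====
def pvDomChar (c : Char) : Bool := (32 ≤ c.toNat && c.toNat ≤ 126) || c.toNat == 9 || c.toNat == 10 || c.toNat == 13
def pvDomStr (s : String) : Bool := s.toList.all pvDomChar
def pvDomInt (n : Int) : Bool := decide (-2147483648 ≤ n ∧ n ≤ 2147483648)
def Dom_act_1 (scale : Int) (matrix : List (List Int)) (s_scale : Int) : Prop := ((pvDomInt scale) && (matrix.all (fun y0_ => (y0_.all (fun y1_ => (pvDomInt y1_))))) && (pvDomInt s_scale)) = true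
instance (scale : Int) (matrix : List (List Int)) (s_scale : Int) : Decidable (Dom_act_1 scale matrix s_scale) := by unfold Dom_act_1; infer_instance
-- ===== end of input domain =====

-- B rebuilds the result functionally in one pass over the rows: each covered row is taken
-- from the closed-form mirror row y + s_scale - 1 - 2*(y % s_scale) of its band; no block
-- loops and no in-place mutation. Return values only (neither program mutates its arguments).

-- ===== PORT A =====
def act_1 (scale : Int) (matrix : List (List Int)) (s_scale : Int) : List (List Int) :=
  let new_matrix := matrix.map (fun row => PySem.List.slice row none none)
  (PySem.List.pyRange 0 (PySem.Int.floordiv scale s_scale) 1).foldl (fun nm i =>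
    (PySem.List.pyRange 0 (PySem.Int.floordiv scale s_scale) 1).foldl (fun nm j =>
      let start_y := i * s_scale
      let end_y := (i + 1) * s_scale
      let start_x := j * s_scale
      (PySem.List.pyRange 0 s_scale 1).foldl (fun nm dy =>
        (PySem.List.pyRange 0 s_scale 1).foldl (fun nm dx =>
          PySem.List.pySetD nm (start_y + dy)
            (PySem.List.pySetD (PySem.List.pyGetD nm (start_y + dy) [])
              (start_x + dx)
              (PySem.List.pyGetD (PySem.List.pyGetD matrix (end_y - dy - 1) []) (start_x + dx) 0))
          ) nm) nm) nm) new_matrix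

-- ===== PORT B =====
def act_1_alt (scale : Int) (matrix : List (List Int)) (s_scale : Int) : List (List Int) :=
  if s_scale ≤ 0 then
    matrix.map (fun row => PySem.List.slice row none none)
  else
    let w := PySem.Int.floordiv scale s_scale * s_scale
    (PySem.List.enumerate matrix).map (fun p =>
      if p.1 < w then
        PySem.List.slice
          (PySem.List.pyGetD matrix (p.1 + s_scale - 1 - 2 * PySem.Int.mod p.1 s_scale) [])
          none (some w) ++
        PySem.List.slice p.2 (some w) none
      else
        PySem.List.slice p.2 none none)

-- ===== PRECONDITION & SPEC =====
-- Pre_ excludes exactly the inputs where A raises: s_scale = 0 (ZeroDivisionError) and, for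
-- s_scale > 0, matrices with fewer than (scale//s_scale)*s_scale rows or with a row shorter
-- than that inside the covered square (IndexError); A returns on every other input.
def Pre_act_1 (scale : Int) (matrix : List (List Int)) (s_scale : Int) : Prop :=
  s_scale ≠ 0 ∧
  (0 < s_scale →
    (PySem.Int.floordiv scale s_scale * s_scale).toNat ≤ matrix.length ∧
    ∀ row ∈ matrix.take (PySem.Int.floordiv scale s_scale * s_scale).toNat,
      (PySem.Int.floordiv scale s_scale * s_scale).toNat ≤ row.length)
instance (scale : Int) (matrix : List (List Int)) (s_scale : Int) : Decidable (Pre_act_1 scale matrix s_scale) := by unfold Pre_act_1; infer_instance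

def pvWitness_act_1 : Int × List (List Int) × Int := (2, [[1, 2], [3, 4]], 2)

def Spec_act_1 (scale : Int) (matrix : List (List Int)) (s_scale : Int) (out : List (List Int)) : Prop := out = act_1_alt scale matrix s_scale
instance (scale : Int) (matrix : List (List Int)) (s_scale : Int) (out : List (List Int)) : Decidable (Spec_act_1 scale matrix s_scale out) := by unfold Spec_act_1; infer_instance

-- ===== CLAIM (what is proved, stated in full; the proofs are below) =====
def Claim_equal_act_1 : Prop := ∀ (scale : Int) (matrix : List (List Int)) (s_scale : Int), Dom_act_1 scale matrix s_scale → Pre_act_1 scale matrix s_scale → Spec_act_1 scale matrix s_scale (act_1 scale matrix s_scale)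

-- ===== LEMMAS AND PROOFS =====

def setCell' (nm : List (List Int)) (y x : Nat) (v : Int) : List (List Int) :=
  nm.set y ((nm.getD y []).set x v)

def getCell (nm : List (List Int)) (y x : Nat) : Int := (nm.getD y []).getD x 0

def mirror (S y : Nat) : Nat := y / S * S + (S - 1 - y % S)

def valA (matrix : List (List Int)) (S y x : Nat) : Int :=
  (matrix.getD (mirror S y) []).getD x 0

def wlistA (K S : Nat) : List (Nat × Nat) :=
  (List.range K).flatMap fun i => (List.range K).flatMap fun j =>
    (List.range S).flatMap fun dy => (List.range S).map fun dx => (i * S + dy, j * S + dx)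

lemma getRow_set (nm : List (List Int)) (r : Nat) (row : List Int) (y : Nat) :
    ((nm.set r row).getD y []) = if y = r ∧ r < nm.length then row else nm.getD y [] := by
  simp only [List.getD, List.getElem?_set]
  by_cases h1 : r = y
  · subst h1
    by_cases h2 : r < nm.length <;> simp [h2]
  · simp [h1, Ne.symm h1]

lemma getRow_setCell' (nm : List (List Int)) (a b : Nat) (v : Int) (y : Nat) :
    (setCell' nm a b v).getD y []
      = if y = a ∧ a < nm.length then (nm.getD a []).set b v else nm.getD y [] := by
  rw [setCell', getRow_set]

lemma band_decomp (S K y : Nat) (hS : 0 < S) :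
    (∃ i, i < K ∧ ∃ d, d < S ∧ i * S + d = y) ↔ y < K * S := by
  constructor
  · rintro ⟨i, hi, d, hd, rfl⟩
    calc i * S + d < (i + 1) * S := by rw [add_mul, one_mul]; omega
    _ ≤ K * S := Nat.mul_le_mul_right S hi
  · intro hy
    exact ⟨y / S, (Nat.div_lt_iff_lt_mul hS).2 hy, y % S,
      Nat.mod_lt _ hS, by rw [Nat.mul_comm]; exact Nat.div_add_mod y S⟩

lemma div_band (i d S : Nat) (hS : 0 < S) (hd : d < S) : (i * S + d) / S = i := by
  rw [Nat.add_comm, Nat.mul_comm, Nat.add_mul_div_left d i hS, Nat.div_eq_of_lt hd, Nat.zero_add]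

lemma mod_band (i d S : Nat) (hd : d < S) : (i * S + d) % S = d := by
  rw [Nat.add_comm, Nat.mul_comm, Nat.add_mul_mod_self_left, Nat.mod_eq_of_lt hd]

lemma mirror_band (i d S : Nat) (hS : 0 < S) (hd : d < S) :
    mirror S (i * S + d) = i * S + (S - 1 - d) := by
  rw [mirror, div_band i d S hS hd, mod_band i d S hd]

lemma mirror_lt (S K y : Nat) (hS : 0 < S) (hy : y < K * S) : mirror S y < K * S := by
  have h1 : y / S < K := (Nat.div_lt_iff_lt_mul hS).2 hy
  calc mirror S y < (y / S + 1) * S := by rw [mirror, add_mul, one_mul]; omega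
  _ ≤ K * S := Nat.mul_le_mul_right S h1

lemma mem_wlistA (K S y x : Nat) (hS : 0 < S) :
    (y, x) ∈ wlistA K S ↔ y < K * S ∧ x < K * S := by
  simp only [wlistA, List.mem_flatMap, List.mem_map, List.mem_range, Prod.mk.injEq]
  constructor
  · rintro ⟨i, hi, j, hj, dy, hdy, dx, hdx, hy, hx⟩
    exact ⟨(band_decomp S K y hS).1 ⟨i, hi, dy, hdy, hy⟩,
           (band_decomp S K x hS).1 ⟨j, hj, dx, hdx, hx⟩⟩
  · rintro ⟨hy, hx⟩
    obtain ⟨i, hi, dy, hdy, hy'⟩ := (band_decomp S K y hS).2 hy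
    obtain ⟨j, hj, dx, hdx, hx'⟩ := (band_decomp S K x hS).2 hx
    exact ⟨i, hi, j, hj, dy, hdy, dx, hdx, hy', hx'⟩

lemma length_foldl_writes (val : Nat → Nat → Int) :
    ∀ (ps : List (Nat × Nat)) (nm : List (List Int)),
      (ps.foldl (fun nm p => setCell' nm p.1 p.2 (val p.1 p.2)) nm).length = nm.length := by
  intro ps
  induction ps with
  | nil => intro nm; rfl
  | cons p ps ih => intro nm; rw [List.foldl_cons, ih]; simp [setCell']

lemma rowlen_foldl_writes (val : Nat → Nat → Int) :
    ∀ (ps : List (Nat × Nat)) (nm : List (List Int)) (y : Nat),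
      ((ps.foldl (fun nm p => setCell' nm p.1 p.2 (val p.1 p.2)) nm).getD y []).length
        = (nm.getD y []).length := by
  intro ps
  induction ps with
  | nil => intro nm y; rfl
  | cons p ps ih =>
    intro nm y
    rw [List.foldl_cons, ih, getRow_setCell']
    split_ifs with h
    · rw [h.1, List.length_set]
    · rfl

lemma getCell_foldl_writes (val : Nat → Nat → Int) :
    ∀ (ps : List (Nat × Nat)) (nm : List (List Int)) (y x : Nat),
      (∀ p ∈ ps, p.1 < nm.length ∧ p.2 < (nm.getD p.1 []).length) →
      getCell (ps.foldl (fun nm p => setCell' nm p.1 p.2 (val p.1 p.2)) nm) y x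
        = if (y, x) ∈ ps then val y x else getCell nm y x := by
  intro ps
  induction ps with
  | nil => intro nm y x _; simp
  | cons p ps ih =>
    intro nm y x hdim
    rw [List.foldl_cons, ih _ _ _ (fun q hq => by
      have h := hdim q (List.mem_cons_of_mem p hq)
      constructor
      · simpa [setCell'] using h.1
      · rw [getRow_setCell']
        split_ifs with h'
        · rw [h'.1] at h; simpa [List.length_set] using h.2
        · exact h.2)]
    by_cases hmem : (y, x) ∈ ps
    · simp [hmem, List.mem_cons]
    · obtain ⟨a, b⟩ := p
      by_cases hp : a = y ∧ b = x
      · obtain ⟨rfl, rfl⟩ := hp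
        have h := hdim (a, b) List.mem_cons_self
        rw [if_neg hmem, if_pos List.mem_cons_self, getCell, getRow_setCell', if_pos ⟨rfl, h.1⟩,
          List.getD_eq_getElem _ _ (by simpa using h.2), List.getElem_set, if_pos rfl]
      · rw [if_neg hmem, if_neg (by
          simp only [List.mem_cons, Prod.mk.injEq]
          rintro (⟨h1, h2⟩ | h)
          · exact hp ⟨h1.symm, h2.symm⟩
          · exact hmem h)]
        rw [getCell, getRow_setCell']
        by_cases h' : y = a ∧ a < nm.length
        · rw [if_pos h']
          obtain ⟨rfl, hlt⟩ := h'
          have hx : ¬ (b = x) := fun hb => hp ⟨rfl, hb⟩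
          simp [getCell, List.getD, hx]
        · rw [if_neg h']; rfl

def Afold (matrix : List (List Int)) (K S : Nat) : List (List Int) :=
  (wlistA K S).foldl (fun nm p => setCell' nm p.1 p.2 (valA matrix S p.1 p.2)) matrix

lemma act_1_eq_Afold (scale : Int) (matrix : List (List Int)) (s_scale : Int) (hs : 0 < s_scale) :
    act_1 scale matrix s_scale
      = Afold matrix (PySem.Int.floordiv scale s_scale).toNat s_scale.toNat := by
  rw [Afold]
  have hS : ((s_scale.toNat : Nat) : Int) = s_scale := Int.toNat_of_nonneg hs.le
  have hSpos : 0 < s_scale.toNat := by omega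
  simp only [act_1, wlistA, PySem.List.slice_none_none, List.map_id',
    PySem.List.pyRange_one, Int.sub_zero, zero_add, List.foldl_map, List.foldl_flatMap]
  apply PySem.List.foldl_congr_mem
  intro acc1 i hi
  apply PySem.List.foldl_congr_mem
  intro acc2 j hj
  apply PySem.List.foldl_congr_mem
  intro acc3 dy hdy
  apply PySem.List.foldl_congr_mem
  intro nm dx hdx
  simp only [List.mem_range] at hi hj hdy hdx
  have e1 : ((i : Int) * s_scale + (dy : Int)) = ((i * s_scale.toNat + dy : Nat) : Int) := by
    push_cast [hS]; ring
  have e2 : ((j : Int) * s_scale + (dx : Int)) = ((j * s_scale.toNat + dx : Nat) : Int) := by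
    push_cast [hS]; ring
  have e3 : (((i : Int) + 1) * s_scale - (dy : Int) - 1)
      = ((i * s_scale.toNat + (s_scale.toNat - 1 - dy) : Nat) : Int) := by
    have h2 : (((i : Int)) + 1) * s_scale = ((i * s_scale.toNat : Nat) : Int) + s_scale := by
      push_cast [hS]; ring
    rw [h2]; omega
  rw [e1, e2, e3]
  simp only [PySem.List.pySetD_natCast, PySem.List.pyGetD_natCast]
  rw [setCell', valA, mirror_band i dy s_scale.toNat hSpos hdy]

lemma length_Afold (matrix : List (List Int)) (K S : Nat) :
    (Afold matrix K S).length = matrix.length :=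
  length_foldl_writes (valA matrix S) (wlistA K S) matrix

lemma Afold_getRow (matrix : List (List Int)) (K S : Nat) (hS : 0 < S)
    (hlen : K * S ≤ matrix.length)
    (hrow : ∀ y, y < K * S → K * S ≤ (matrix.getD y []).length) (y : Nat) :
    (Afold matrix K S).getD y []
      = if y < K * S then
          (matrix.getD (mirror S y) []).take (K * S) ++ (matrix.getD y []).drop (K * S)
        else matrix.getD y [] := by
  have hdim : ∀ p ∈ wlistA K S, p.1 < matrix.length ∧ p.2 < (matrix.getD p.1 []).length := by
    intro p hp
    obtain ⟨a, b⟩ := p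
    rw [mem_wlistA K S a b hS] at hp
    exact ⟨lt_of_lt_of_le hp.1 hlen, lt_of_lt_of_le hp.2 (hrow a hp.1)⟩
  have hcell : ∀ x, getCell (Afold matrix K S) y x
      = if (y, x) ∈ wlistA K S then valA matrix S y x else getCell matrix y x :=
    fun x => getCell_foldl_writes (valA matrix S) (wlistA K S) matrix y x hdim
  have hrl : ((Afold matrix K S).getD y []).length = (matrix.getD y []).length :=
    rowlen_foldl_writes (valA matrix S) (wlistA K S) matrix y
  by_cases hy : y < K * S
  · rw [if_pos hy]
    have hmlt : mirror S y < K * S := mirror_lt S K y hS hy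
    have hylen : K * S ≤ (matrix.getD y []).length := hrow y hy
    have hmlen : K * S ≤ (matrix.getD (mirror S y) []).length := hrow _ hmlt
    apply List.ext_getElem
    · rw [hrl, List.length_append, List.length_take, List.length_drop]; omega
    · intro x h1 h2
      have hxlen : x < (matrix.getD y []).length := by rwa [hrl] at h1
      have hc := hcell x
      simp only [mem_wlistA K S y x hS] at hc
      have lhsEq : ((Afold matrix K S).getD y [])[x] = getCell (Afold matrix K S) y x :=
        (List.getD_eq_getElem _ _ h1).symm
      rw [lhsEq, hc]
      by_cases hx : x < K * S
      · rw [if_pos ⟨hy, hx⟩]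
        have hxt : x < ((matrix.getD (mirror S y) []).take (K * S)).length := by
          rw [List.length_take]; omega
        rw [List.getElem_append_left hxt, List.getElem_take]
        rw [valA, List.getD_eq_getElem _ _ (lt_of_lt_of_le hx hmlen)]
      · rw [if_neg (fun h => hx h.2)]
        have hxt : ((matrix.getD (mirror S y) []).take (K * S)).length ≤ x := by
          rw [List.length_take]; omega
        rw [List.getElem_append_right hxt]
        rw [getCell, List.getD_eq_getElem _ _ hxlen]
        rw [List.getElem_drop]
        congr 1
        rw [List.length_take]
        omega
  · rw [if_neg hy]
    apply List.ext_getElem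
    · exact hrl
    · intro x h1 h2
      have hc := hcell x
      simp only [mem_wlistA K S y x hS] at hc
      rw [if_neg (fun h => hy h.1)] at hc
      rw [← List.getD_eq_getElem ((Afold matrix K S).getD y []) 0 h1,
        ← List.getD_eq_getElem (matrix.getD y []) 0 h2]
      exact hc

-- the closed-form mirror index B uses equals the band-mirror function, as integers
lemma mirror_closed_form (S y : Nat) (hS : 0 < S) :
    ((mirror S y : Nat) : Int) = (y : Int) + (S : Int) - 1 - 2 * ((y % S : Nat) : Int) := by
  have h1 : y % S < S := Nat.mod_lt _ hS
  have h2 : y / S * S + y % S = y := by rw [Nat.mul_comm]; exact Nat.div_add_mod y S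
  rw [mirror]
  set t := y / S * S with ht
  omega

theorem main_eq (scale : Int) (matrix : List (List Int)) (s_scale : Int)
    (hnz : s_scale ≠ 0)
    (hpos : 0 < s_scale →
      (PySem.Int.floordiv scale s_scale * s_scale).toNat ≤ matrix.length ∧
      ∀ row ∈ matrix.take (PySem.Int.floordiv scale s_scale * s_scale).toNat,
        (PySem.Int.floordiv scale s_scale * s_scale).toNat ≤ row.length) :
    act_1 scale matrix s_scale = act_1_alt scale matrix s_scale := by
  by_cases hs : 0 < s_scale
  · obtain ⟨hlen', hrow'⟩ := hpos hs
    have hS : ((s_scale.toNat : Nat) : Int) = s_scale := Int.toNat_of_nonneg hs.le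
    have hSpos : 0 < s_scale.toNat := by omega
    set k := PySem.Int.floordiv scale s_scale with hkdef
    set K := k.toNat with hKdef
    set S := s_scale.toNat with hSdef
    have hWcase : k * s_scale = ((K * S : Nat) : Int) ∨ (K = 0 ∧ k * s_scale < 0) := by
      by_cases hk0 : 0 ≤ k
      · left
        push_cast [hKdef, Int.toNat_of_nonneg hk0, hS]
        ring
      · right
        constructor
        · omega
        · have : k < 0 := by omega
          exact mul_neg_of_neg_of_pos this hs
    have hKS : K * S ≤ matrix.length := by
      rcases hWcase with h | h
      · rw [h, Int.toNat_natCast] at hlen'; exact hlen'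
      · simp [h.1]
    have hrowN : ∀ y, y < K * S → K * S ≤ (matrix.getD y []).length := by
      intro y hy
      rcases hWcase with h | h
      · rw [h, Int.toNat_natCast] at hrow'
        have hyl : y < (matrix.take (K * S)).length := by
          rw [List.length_take]; omega
        have hymat : y < matrix.length := by omega
        have e : matrix.getD y [] = (matrix.take (K * S))[y]'hyl := by
          rw [List.getD_eq_getElem _ _ hymat, List.getElem_take]
        have hmem : matrix.getD y [] ∈ matrix.take (K * S) := by
          rw [e]; exact List.getElem_mem hyl
        exact hrow' _ hmem
      · simp [h.1] at hy
    have haltdef : act_1_alt scale matrix s_scale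
        = (PySem.List.enumerate matrix).map (fun p =>
            if p.1 < k * s_scale then
              PySem.List.slice
                (PySem.List.pyGetD matrix (p.1 + s_scale - 1 - 2 * PySem.Int.mod p.1 s_scale) [])
                none (some (k * s_scale)) ++
              PySem.List.slice p.2 (some (k * s_scale)) none
            else
              PySem.List.slice p.2 none none) := by
      rw [act_1_alt, if_neg (by omega)]
    rw [act_1_eq_Afold scale matrix s_scale hs, haltdef]
    apply List.ext_getElem
    · rw [length_Afold, List.length_map, PySem.List.length_enumerate]
    · intro y h1 h2
      rw [length_Afold] at h1
      have hen : y < (PySem.List.enumerate matrix).length := by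
        rwa [PySem.List.length_enumerate]
      rw [List.getElem_map, PySem.List.getElem_enumerate]
      rw [← List.getD_eq_getElem (Afold matrix K S) [] (by rwa [length_Afold]),
        Afold_getRow matrix K S hSpos hKS hrowN y]
      simp only [zero_add]
      by_cases hy : y < K * S
      · have hwk : k * s_scale = ((K * S : Nat) : Int) := by
          rcases hWcase with h | h
          · exact h
          · simp [h.1] at hy
        rw [if_pos hy, if_pos (by rw [hwk]; exact_mod_cast hy)]
        have hmod : PySem.Int.mod (y : Int) s_scale = ((y % S : Nat) : Int) := by
          rw [PySem.Int.mod_eq_emod_of_pos hs, ← hS]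
          exact (Int.natCast_mod y S).symm
        have hidx : (y : Int) + s_scale - 1 - 2 * PySem.Int.mod (y : Int) s_scale
            = ((mirror S y : Nat) : Int) := by
          rw [hmod, mirror_closed_form S y hSpos, hS]
        simp only [hidx, hwk, PySem.List.pyGetD_natCast, PySem.List.slice_to_natCast,
          PySem.List.slice_from_natCast]
        rw [List.getD_eq_getElem _ _ h1]
      · have hnlt : ¬ ((y : Int) < k * s_scale) := by
          rcases hWcase with h | h
          · rw [h]; push_cast; omega
          · omega
        rw [if_neg hy, if_neg hnlt, PySem.List.slice_none_none,
          List.getD_eq_getElem _ _ h1]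
  · have hneg : s_scale < 0 := by omega
    have hnil : PySem.List.pyRange 0 s_scale 1 = [] := PySem.List.pyRange_one_eq_nil (by omega)
    rw [act_1_alt, if_pos (by omega)]
    simp [act_1, hnil, PySem.List.slice_none_none, List.map_id', List.foldl_fixed]

-- ===== VERDICT (by name: the statement is the Claim_ definition above) =====
theorem act_1_spec : Claim_equal_act_1 := by
  intro scale matrix s_scale _ hpre
  exact main_eq scale matrix s_scale hpre.1 hpre.2
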